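-- pv_equiv track=rewrite | github.com/MrBrantCode/unitest_baseline | mut_generate/mist_train_taco/taco_3466/solution.py | calculate_compression_difference
-- ===== SOURCE A (Python) =====
-- def calculate_compression_difference(S: str) -> int:
--     n = len(S)
--
--     if n == 1:
--         if S[0].isalpha():
--             return -32
--         else:
--             return 0
--
--     num = 0
--     ch = 0
--     c = 1
--     x = S[0]
--     ans = ''
--
--     for i in range(1, n):
--         if S[i - 1] == S[i]:
--             c += 1
--             if i == n - 1:
--                 ans += S[i - 1]
--                 ch += 1
--                 if c > 1:
--                     ans += str(c)
--                     num += 1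
--                 c = 1
--         else:
--             ans += S[i - 1]
--             ch += 1
--             if c > 1:
--                 ans += str(c)
--                 num += 1
--             c = 1
--             if i == n - 1:
--                 ans += S[i]
--                 ch += 1
--
--     original_size = n * 8
--     compressed_size = num * 32 + ch * 8
--     difference = original_size - compressed_size
--
--     return difference
-- ===== SOURCE B (Python) =====
-- def calculate_compression_difference(S: str) -> int:
--     n = len(S)
--     if n == 1:
--         return -32 if S.isalpha() else 0
--     ch = num = 0
--     i = 0
--     while i < n:
--         j = i
--         while j < n and S[j] == S[i]:
--             j += 1
--         ch += 1
--         if j - i > 1: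
--             num += 1
--         i = j
--     return n * 8 - (num * 32 + ch * 8)
-- ===== Notes on version B (the rewrite author's own statement) =====
-- stated objective: simpler
-- what changed: Replaces A's index-comparison state machine (adjacent-pair loop with run counter c, last-index special casing and a dead output string) by a direct two-pointer scan over the runs of S, counting groups and multi-length groups and applying the size formula once.
import Mathlib
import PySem

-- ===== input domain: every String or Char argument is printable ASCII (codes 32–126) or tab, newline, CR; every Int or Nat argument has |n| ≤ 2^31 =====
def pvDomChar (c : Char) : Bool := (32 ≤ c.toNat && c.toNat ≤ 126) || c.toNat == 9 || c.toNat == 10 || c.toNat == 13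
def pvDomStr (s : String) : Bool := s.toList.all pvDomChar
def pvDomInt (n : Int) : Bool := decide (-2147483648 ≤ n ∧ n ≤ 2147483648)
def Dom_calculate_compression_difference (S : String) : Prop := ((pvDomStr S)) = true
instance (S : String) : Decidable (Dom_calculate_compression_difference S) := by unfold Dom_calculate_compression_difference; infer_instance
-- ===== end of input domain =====

-- B replaces A's adjacent-pair state machine (with dead output string) by a two-pointer run scan; simpler, same cost.

-- ===== PORT A =====
-- A's for-loop over i = 1..n-1 as the obvious structural recursion on (prev = S[i-1], rest = S[i:]),
-- with the same state (num, ch, c, ans); Python's 'i == n - 1' test is 'rest = []'.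
def aLoop : Char → List Char → Int × Int × Int × List Char → Int × Int × Int × List Char
  | _, [], s => s
  | prev, x :: rest, (num, ch, c, ans) =>
    if prev == x then
      if rest = [] then
        aLoop x rest
          ((if c + 1 > 1 then num + 1 else num), ch + 1, 1,
           (if c + 1 > 1 then (ans ++ [prev]) ++ PySem.Int.toChars (c + 1) else ans ++ [prev]))
      else
        aLoop x rest (num, ch, c + 1, ans)
    else
      if rest = [] then
        aLoop x rest
          ((if c > 1 then num + 1 else num), ch + 1 + 1, 1,
           ((if c > 1 then (ans ++ [prev]) ++ PySem.Int.toChars c else ans ++ [prev]) ++ [x]))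
      else
        aLoop x rest
          ((if c > 1 then num + 1 else num), ch + 1, 1,
           (if c > 1 then (ans ++ [prev]) ++ PySem.Int.toChars c else ans ++ [prev]))

def calculate_compression_difference (S : String) : Int :=
  let l := S.toList
  let n : Int := l.length
  if n == 1 then
    if PySem.Chars.isalpha (l.headD ' ') then -32 else 0
  else
    match l with
    | [] => 0   -- Python raises IndexError at x = S[0]; excluded by Pre_
    | x :: rest =>
      let r := aLoop x rest (0, 0, 1, [])
      n * 8 - (r.1 * 32 + r.2.1 * 8)

-- ===== PORT B =====
-- B's outer while-loop: each step consumes one whole run (the inner while = takeWhile/dropWhile),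
-- accumulating ch = number of runs, num = number of runs of length > 1.
def bLoop : List Char → Int → Int → Int × Int
  | [], ch, num => (ch, num)
  | c :: rest, ch, num =>
    bLoop (rest.dropWhile (· == c)) (ch + 1)
      (if (rest.takeWhile (· == c)).length + 1 > 1 then num + 1 else num)
termination_by l => l.length
decreasing_by
  exact Nat.lt_succ_of_le (List.length_dropWhile_le _ _)

def calculate_compression_difference_alt (S : String) : Int :=
  let l := S.toList
  let n : Int := l.length
  if n == 1 then
    if PySem.Chars.strIsalpha l then -32 else 0
  else
    let r := bLoop l 0 0
    n * 8 - (r.2 * 32 + r.1 * 8)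

-- ===== PRECONDITION & SPEC =====
-- Pre_ excludes only the empty string, on which A raises IndexError (x = S[0]).
def Pre_calculate_compression_difference (S : String) : Prop := S.toList ≠ []
instance (S : String) : Decidable (Pre_calculate_compression_difference S) := by unfold Pre_calculate_compression_difference; infer_instance
def pvWitness_calculate_compression_difference : String := "aab"

def Spec_calculate_compression_difference (S : String) (out : Int) : Prop := out = calculate_compression_difference_alt S
instance (S : String) (out : Int) : Decidable (Spec_calculate_compression_difference S out) := by unfold Spec_calculate_compression_difference; infer_instance

-- ===== CLAIM (what is proved, stated in full; the proofs are below) =====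
def Claim_equal_calculate_compression_difference : Prop := ∀ (S : String), Dom_calculate_compression_difference S → Pre_calculate_compression_difference S → Spec_calculate_compression_difference S (calculate_compression_difference S)

-- ===== LEMMAS AND PROOFS =====

-- bLoop's accumulators only add up.
theorem bLoop_acc : ∀ (m : Nat) (l : List Char) (ch num : Int), l.length ≤ m →
    bLoop l ch num = (ch + (bLoop l 0 0).1, num + (bLoop l 0 0).2) := by
  intro m
  induction m with
  | zero =>
      intro l ch num h
      have : l = [] := List.length_eq_zero_iff.mp (Nat.le_zero.mp h)
      subst this; simp [bLoop]
  | succ m ih =>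
      intro l ch num h
      cases l with
      | nil => simp [bLoop]
      | cons c rest =>
          have hlen : (rest.dropWhile (· == c)).length ≤ m := by
            have := List.length_dropWhile_le (· == c) rest
            simp at h; omega
          rw [bLoop, bLoop,
              ih (rest.dropWhile (· == c)) (ch + 1)
                (if (rest.takeWhile (· == c)).length + 1 > 1 then num + 1 else num) hlen,
              ih (rest.dropWhile (· == c)) ((0:Int) + 1)
                (if (rest.takeWhile (· == c)).length + 1 > 1 then (0:Int) + 1 else 0) hlen]
          simp only [Prod.mk.injEq]
          split_ifs <;> exact ⟨by omega, by omega⟩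

-- A's state machine over rest, started with a current run of length c ≥ 1 ending at prev = x,
-- computes exactly B's run counts of (x :: rest), the first run's length>1 test reading c + its extension.
theorem aLoop_runs : ∀ (rest : List Char) (x : Char) (num ch c : Int) (ans : List Char),
    1 ≤ c → rest ≠ [] →
    ((aLoop x rest (num, ch, c, ans)).1, (aLoop x rest (num, ch, c, ans)).2.1) =
      (num + (if c + ((rest.takeWhile (· == x)).length : Int) > 1 then 1 else 0)
           + (bLoop (rest.dropWhile (· == x)) 0 0).2,
       ch + 1 + (bLoop (rest.dropWhile (· == x)) 0 0).1) := by
  intro rest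
  induction rest with
  | nil => intro x num ch c ans hc hne; exact absurd rfl hne
  | cons y rest2 ih =>
      intro x num ch c ans hc _
      by_cases hxy : x = y
      · subst hxy
        cases rest2 with
        | nil =>
            have hgt : c + 1 > 1 := by omega
            simp [aLoop, bLoop, hgt]
        | cons z rest3 =>
            have hne : (z :: rest3 : List Char) ≠ [] := by simp
            rw [aLoop, if_pos (beq_self_eq_true x), if_neg hne]
            rw [ih x num ch (c + 1) ans (by omega) hne]
            have ht : List.takeWhile (· == x) (x :: z :: rest3)
                = x :: List.takeWhile (· == x) (z :: rest3) := by simp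
            have hd : List.dropWhile (· == x) (x :: z :: rest3)
                = List.dropWhile (· == x) (z :: rest3) := by simp
            rw [ht, hd]
            simp only [List.length_cons, Prod.mk.injEq]
            push_cast
            split_ifs <;> first
              | exact ⟨by omega, trivial⟩
              | exact ⟨by omega, by omega⟩
              | omega
              | trivial
      · have hbeq : (x == y) = false := by simp [hxy]
        have hbeq' : (y == x) = false := by simp [Ne.symm hxy]
        cases rest2 with
        | nil =>
            simp [aLoop, bLoop, hbeq, hbeq', Prod.mk.injEq]
            all_goals ((try push_cast); (try split_ifs) <;> omega)
        | cons z rest3 =>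
            have hne : (z :: rest3 : List Char) ≠ [] := by simp
            rw [aLoop, if_neg (show ¬((x == y) = true) by simp [hxy]), if_neg hne]
            rw [ih y (if c > 1 then num + 1 else num) (ch + 1) 1
                (if c > 1 then (ans ++ [x]) ++ PySem.Int.toChars c else ans ++ [x]) le_rfl hne]
            have ht2 : List.takeWhile (· == x) (y :: z :: rest3) = [] := by simp [hbeq']
            have hd2 : List.dropWhile (· == x) (y :: z :: rest3) = y :: z :: rest3 := by
              simp [hbeq']
            rw [ht2, hd2, bLoop,
                bLoop_acc ((z :: rest3).dropWhile (· == y)).length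
                  ((z :: rest3).dropWhile (· == y)) ((0:Int) + 1)
                  (if ((z :: rest3).takeWhile (· == y)).length + 1 > 1 then (0:Int) + 1 else 0)
                  le_rfl]
            simp only [Prod.mk.injEq, List.length_nil]
            push_cast
            split_ifs <;> first
              | exact ⟨by omega, trivial⟩
              | exact ⟨by omega, by omega⟩
              | omega
              | trivial

-- B's n == 1 branch (S.isalpha() on a one-character string) is the character test A uses.
theorem strIsalpha_singleton (x : Char) :
    PySem.Chars.strIsalpha [x] = PySem.Chars.isalpha x := by
  simp [PySem.Chars.strIsalpha]

-- ===== VERDICT (by name: the statement is the Claim_ definition above) =====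
theorem calculate_compression_difference_spec : Claim_equal_calculate_compression_difference := by
  intro S _ hpre
  unfold Spec_calculate_compression_difference
  unfold calculate_compression_difference calculate_compression_difference_alt
  cases hl : S.toList with
  | nil => exact absurd hl hpre
  | cons x rest =>
      cases rest with
      | nil =>
          simp [strIsalpha_singleton]
      | cons y rest2 =>
          have hn : (((x :: y :: rest2).length : Int) == 1) = false := by
            simp; omega
          simp only [hn, if_false, Bool.false_eq_true]
          have hrw := aLoop_runs (y :: rest2) x 0 0 1 [] (by norm_num) (by simp)
          simp only [Prod.mk.injEq] at hrw
          rw [bLoop,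
              bLoop_acc (((y :: rest2).dropWhile (· == x)).length)
                ((y :: rest2).dropWhile (· == x)) ((0:Int) + 1)
                (if ((y :: rest2).takeWhile (· == x)).length + 1 > 1 then (0:Int) + 1 else 0) le_rfl]
          obtain ⟨h1, h2⟩ := hrw
          rw [h1, h2]
          push_cast
          split_ifs <;> first
              | exact ⟨by omega, trivial⟩
              | exact ⟨by omega, by omega⟩
              | omega
              | trivial
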